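-- pv_equiv track=rewrite | github.com/WallerTsai/OJ-Solution | leetcode-py/贡献法/No3871.py | countCommas
-- ===== SOURCE A (Python) =====
-- def countCommas(n: int) -> int:
--     if n < 1_000:
--         return 0
--
--     ans = 0
--     while n >= 1_000:
--         ans += n - 1_000 + 1
--         n %= 1_000
--     return ans  # 错误
-- ===== SOURCE B (Python) =====
-- def countCommas(n: int) -> int:
--     # Count the integers in [1000, n] band-by-band over digit lengths:
--     # for each band [lo, 10*lo - 1] (4-digit numbers, 5-digit numbers, ...)
--     # add the size of its intersection with [1000, n].
--     total = 0
--     lo = 1000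
--     while lo <= n:
--         total += min(n, 10 * lo - 1) - lo + 1
--         lo *= 10
--     return total
-- ===== Notes on version B (the rewrite author's own statement) =====
-- stated objective: alternative
-- what changed: Instead of A's accumulate-then-mod loop on n itself, B sums the sizes of the intersections of [1000,n] with each digit-length band [lo,10*lo-1], lo = 1000,10000,..., never mutating n.
import Mathlib
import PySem

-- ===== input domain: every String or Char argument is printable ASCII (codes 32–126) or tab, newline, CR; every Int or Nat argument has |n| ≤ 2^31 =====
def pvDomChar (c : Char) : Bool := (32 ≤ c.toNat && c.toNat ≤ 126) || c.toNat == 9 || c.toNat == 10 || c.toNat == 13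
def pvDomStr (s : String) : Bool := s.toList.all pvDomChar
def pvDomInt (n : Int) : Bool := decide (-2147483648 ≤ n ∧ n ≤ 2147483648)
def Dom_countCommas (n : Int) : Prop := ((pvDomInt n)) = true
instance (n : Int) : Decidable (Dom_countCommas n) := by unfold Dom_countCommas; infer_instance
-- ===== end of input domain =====

-- B replaces A's accumulate-then-mod loop by summing, per digit-length band
-- [lo, 10*lo-1], the size of the band's intersection with [1000, n] (alternative).

-- ===== PORT A =====
-- A's while-loop: state (n, ans); terminates because n %= 1000 drops n below 1000
def countCommasLoop (n ans : Int) : Int :=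
  if h : n ≥ 1000 then
    countCommasLoop (PySem.Int.mod n 1000) (ans + (n - 1000 + 1))
  else ans
termination_by n.toNat
decreasing_by
  have h1 : PySem.Int.mod n 1000 = n % 1000 := PySem.Int.mod_eq_emod_of_pos (by omega)
  have h2 : 0 ≤ n % 1000 := Int.emod_nonneg n (by omega)
  have h3 : n % 1000 < 1000 := Int.emod_lt_of_pos n (by omega)
  omega

def countCommas (n : Int) : Int :=
  if n < 1000 then 0
  else countCommasLoop n 0

-- ===== PORT B =====
-- termination helper for altLoop (cited by name in decreasing_by)
theorem pvAltDec (n : Int) (k : Nat) (h : (1000 : Int) * 10 ^ k ≤ n) :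
    n.toNat - (k + 1) < n.toNat - k := by
  have hk : k < 10 ^ k := Nat.lt_pow_self (by omega)
  have hk' : (k : Int) < 10 ^ k := by exact_mod_cast hk
  have h10 : (10 : Int) ^ k ≤ 1000 * 10 ^ k :=
    le_mul_of_one_le_left (pow_nonneg (by norm_num) k) (by norm_num)
  have : (k : Int) < n := lt_of_lt_of_le hk' (le_trans h10 h)
  omega

-- B's while-loop: lo = 1000 * 10^k (kept as the exponent k for termination); state total
def altLoop (n : Int) (k : Nat) (total : Int) : Int :=
  if h : (1000 : Int) * 10 ^ k ≤ n then
    altLoop n (k + 1) (total + (min n (10 * (1000 * 10 ^ k) - 1) - 1000 * 10 ^ k + 1))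
  else total
termination_by n.toNat - k
decreasing_by exact pvAltDec n k h

def countCommas_alt (n : Int) : Int := altLoop n 0 0

-- ===== PRECONDITION & SPEC =====
def Spec_countCommas (n : Int) (out : Int) : Prop := out = countCommas_alt n
instance (n : Int) (out : Int) : Decidable (Spec_countCommas n out) := by unfold Spec_countCommas; infer_instance

-- ===== CLAIM (what is proved, stated in full; the proofs are below) =====
def Claim_equal_countCommas : Prop := ∀ (n : Int), Dom_countCommas n → Spec_countCommas n (countCommas n)

-- ===== LEMMAS AND PROOFS =====
theorem countCommasLoop_of_ge (n ans : Int) (h : n ≥ 1000) :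
    countCommasLoop n ans = ans + (n - 1000 + 1) := by
  rw [countCommasLoop, dif_pos h]
  have h1 : PySem.Int.mod n 1000 = n % 1000 := PySem.Int.mod_eq_emod_of_pos (by omega)
  have h3 : n % 1000 < 1000 := Int.emod_lt_of_pos n (by omega)
  rw [countCommasLoop, dif_neg (by omega)]

theorem altLoop_of_le (n : Int) (k : Nat) (total : Int)
    (h : (1000 : Int) * 10 ^ k ≤ n) :
    altLoop n k total = total + (n - 1000 * 10 ^ k + 1) := by
  rw [altLoop, dif_pos h]
  by_cases h2 : (1000 : Int) * 10 ^ (k + 1) ≤ n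
  · rw [altLoop_of_le n (k + 1) _ h2]
    have : (1000 : Int) * 10 ^ (k + 1) = 10 * (1000 * 10 ^ k) := by ring
    rw [this] at h2 ⊢
    rw [min_eq_right (by omega)]
    ring
  · rw [altLoop, dif_neg h2]
    have : (1000 : Int) * 10 ^ (k + 1) = 10 * (1000 * 10 ^ k) := by ring
    rw [this] at h2
    rw [min_eq_left (by omega)]
termination_by n.toNat - k
decreasing_by exact pvAltDec n k h

-- ===== VERDICT (by name: the statement is the Claim_ definition above) =====
theorem countCommas_spec : Claim_equal_countCommas := by
  intro n _
  unfold Spec_countCommas countCommas countCommas_alt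
  by_cases h : n < 1000
  · rw [if_pos h, altLoop, dif_neg (by simpa using (by omega : ¬ (1000:Int) ≤ n))]
  · rw [if_neg h, countCommasLoop_of_ge n 0 (by omega),
      altLoop_of_le n 0 0 (by simpa using (by omega : (1000:Int) ≤ n))]
    ring
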